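-- pv_equiv track=rewrite | github.com/thebenkogan/everybody-codes-2025 | 16.py | get_original
-- ===== SOURCE A (Python) =====
-- def get_original(nums):
--     i = 0
--     orig = []
--     while i < len(nums):
--         if nums[i] > 0:
--             for j in range(i, len(nums), i + 1):
--                 nums[j] -= 1
--             orig.append(i + 1)
--         i += 1
--
--     return orig
-- ===== SOURCE B (Python) =====
-- def get_original(nums):
--     # Gathers from already-chosen divisors instead of scattering decrements;
--     # does not mutate nums (A mutates it in place) -- return value is identical.
--     orig = []
--     for b in range(1, len(nums) + 1):
--         count = sum(1 for a in orig if b % a == 0)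
--         if nums[b - 1] > count:
--             orig.append(b)
--     return orig
-- ===== Notes on version B (the rewrite author's own statement) =====
-- stated objective: alternative
-- what changed: Instead of simulating the sieve by scattering in-place decrements to all multiples of each chosen position, B gathers: for each position b it counts how many already-chosen values divide b and compares nums[b-1] against that count, never mutating the input list (the equivalence is about the return value; A mutates nums in place).
import Mathlib
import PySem

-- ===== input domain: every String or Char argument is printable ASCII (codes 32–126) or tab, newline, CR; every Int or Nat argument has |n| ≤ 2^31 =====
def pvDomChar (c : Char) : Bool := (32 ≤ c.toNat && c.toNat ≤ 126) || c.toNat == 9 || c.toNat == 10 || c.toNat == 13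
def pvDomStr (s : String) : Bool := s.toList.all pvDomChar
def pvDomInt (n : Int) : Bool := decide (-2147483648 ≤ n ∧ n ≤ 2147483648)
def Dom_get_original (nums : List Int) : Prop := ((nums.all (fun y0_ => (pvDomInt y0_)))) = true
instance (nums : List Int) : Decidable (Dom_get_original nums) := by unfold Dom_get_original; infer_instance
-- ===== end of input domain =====

-- B gathers counts from already-chosen divisors instead of A's scatter of in-place decrements;
-- the equivalence proved is about the RETURN value only (A mutates nums in place, B does not).

-- ===== PORT A =====
-- nums[j] -= 1 for the inner 'for j in range(i, len(nums), i+1)' loop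
def pvDecStep (xs : List Int) (j : Int) : List Int := xs.set j.toNat (xs.getD j.toNat 0 - 1)

-- the while loop; fuel = initial len(nums) suffices since i increases by 1 each iteration
def pvLoopA : Nat → List Int → Nat → List Int → List Int
  | 0, _, _, orig => orig
  | fuel+1, ns, i, orig =>
    if i < ns.length then
      if ns.getD i 0 > 0 then
        pvLoopA fuel ((PySem.List.pyRange (i : Int) (ns.length : Int) ((i : Int)+1)).foldl pvDecStep ns)
          (i+1) (orig ++ [(i : Int)+1])
      else pvLoopA fuel ns (i+1) orig
    else orig

def get_original (nums : List Int) : List Int := pvLoopA nums.length nums 0 []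

-- ===== PORT B =====
def get_original_alt (nums : List Int) : List Int :=
  (PySem.List.pyRange 1 ((nums.length : Int) + 1) 1).foldl
    (fun orig b =>
      let count : Int := (orig.countP (fun a => PySem.Int.mod b a == 0) : Int)
      if nums.getD (b.toNat - 1) 0 > count then orig ++ [b] else orig) []

-- ===== PRECONDITION & SPEC =====
def Spec_get_original (nums : List Int) (out : List Int) : Prop := out = get_original_alt nums
instance (nums : List Int) (out : List Int) : Decidable (Spec_get_original nums out) := by unfold Spec_get_original; infer_instance

-- ===== CLAIM (what is proved, stated in full; the proofs are below) =====
def Claim_equal_get_original : Prop := ∀ (nums : List Int), Dom_get_original nums → Spec_get_original nums (get_original nums)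

-- ===== LEMMAS AND PROOFS =====

-- model of B: chosen values after processing b = 1..k
def pvSel (nums : List Int) : Nat → List Int
  | 0 => []
  | k+1 =>
    let s := pvSel nums k
    if nums.getD k 0 > (s.countP (fun a => PySem.Int.mod ((k : Int)+1) a == 0) : Int)
    then s ++ [(k : Int)+1] else s

theorem pvSel_prefix (nums : List Int) (i k : Nat) (h : i ≤ k) :
    (pvSel nums i) <+: (pvSel nums k) := by
  induction k with
  | zero => interval_cases i; exact List.prefix_rfl
  | succ k ih =>
    rcases Nat.lt_or_ge i (k+1) with hik | hik
    · refine (ih (by omega)).trans ?_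
      simp only [pvSel]
      split
      · exact List.prefix_append _ _
      · exact List.prefix_rfl
    · have : i = k+1 := by omega
      subst this; exact List.prefix_rfl

theorem pvDecFold_length (L : List Int) (ns : List Int) :
    (L.foldl pvDecStep ns).length = ns.length := by
  induction L generalizing ns with
  | nil => rfl
  | cons j L ih => simp [List.foldl, ih, pvDecStep]

theorem pvDecFold_getD (L : List Int) (hL : ∀ j ∈ L, 0 ≤ j) (ns : List Int) (t : Nat)
    (ht : t < ns.length) :
    (L.foldl pvDecStep ns).getD t 0 = ns.getD t 0 - (L.count (t : Int) : Int) := by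
  induction L generalizing ns with
  | nil => simp
  | cons j L ih =>
    have hj : 0 ≤ j := hL j (by simp)
    have hL' : ∀ x ∈ L, 0 ≤ x := fun x hx => hL x (by simp [hx])
    simp only [List.foldl_cons]
    rw [ih hL' _ (by simp [pvDecStep, ht]), List.count_cons]
    by_cases hjt : j.toNat = t
    · have hjt' : j = (t : Int) := by omega
      have hset : (pvDecStep ns j).getD t 0 = ns.getD t 0 - 1 := by
        simp [pvDecStep, hjt, List.getD_eq_getElem?_getD, ht]
      rw [hset, if_pos (by simp [hjt'])]
      push_cast; ring
    · have hset : (pvDecStep ns j).getD t 0 = ns.getD t 0 := by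
        simp [pvDecStep, List.getD_eq_getElem?_getD, hjt]
      rw [hset, if_neg (by simp; omega)]
      push_cast; ring

theorem pvNodup_pyRange_pos (a b s : Int) (hs : 0 < s) : (PySem.List.pyRange a b s).Nodup := by
  rw [PySem.List.pyRange_of_pos a b hs]
  refine List.Nodup.map ?_ List.nodup_range
  intro k1 k2 h
  have h2 : s * (k1 : Int) = s * (k2 : Int) := add_left_cancel h
  exact_mod_cast mul_left_cancel₀ (ne_of_gt hs) h2

-- the count of t in range(i, n, i+1): 1 iff i ≤ t < n and (i+1) ∣ (t+1)
theorem pvCount_pyRange (i n t : Nat) :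
    ((PySem.List.pyRange (i : Int) (n : Int) ((i : Int)+1)).count (t : Int) : Int) =
      if i ≤ t ∧ t < n ∧ ((i : Int)+1) ∣ ((t : Int)+1) then 1 else 0 := by
  have hnd := pvNodup_pyRange_pos (i : Int) (n : Int) ((i : Int)+1) (by positivity)
  have hmem := PySem.List.mem_pyRange_iff_of_pos (a := (i : Int)) (b := (n : Int))
      (s := (i : Int)+1) (by positivity) (t : Int)
  by_cases h : i ≤ t ∧ t < n ∧ ((i : Int)+1) ∣ ((t : Int)+1)
  · have hm : (t : Int) ∈ PySem.List.pyRange (i : Int) (n : Int) ((i : Int)+1) := by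
      refine hmem.mpr ⟨by exact_mod_cast h.1, by exact_mod_cast h.2.1, ?_⟩
      have he : (t : Int) - (i : Int) = ((t : Int)+1) - ((i : Int)+1) := by ring
      rw [he]; exact dvd_sub h.2.2 dvd_rfl
    rw [List.count_eq_one_of_mem hnd hm, if_pos h]
    norm_num
  · have hm : (t : Int) ∉ PySem.List.pyRange (i : Int) (n : Int) ((i : Int)+1) := by
      intro hc
      obtain ⟨h1, h2, h3⟩ := hmem.mp hc
      refine h ⟨by exact_mod_cast h1, by exact_mod_cast h2, ?_⟩
      have he : ((t : Int)+1) = ((t : Int) - (i : Int)) + ((i : Int)+1) := by ring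
      rw [he]; exact dvd_add h3 dvd_rfl
    rw [List.count_eq_zero_of_not_mem hm, if_neg h]
    norm_num

-- main invariant: if ns carries nums minus the decrements of the values chosen so far,
-- the rest of A's loop appends exactly the rest of B's chosen values
theorem pvLoopA_eq (nums : List Int) (fuel i : Nat) (ns orig : List Int)
    (hlen : ns.length = nums.length) (hfuel : nums.length - i ≤ fuel)
    (hinv : ∀ j, i ≤ j → j < nums.length →
      ns.getD j 0 = nums.getD j 0 -
        ((pvSel nums i).countP (fun a => PySem.Int.mod ((j : Int)+1) a == 0) : Int)) :
    pvLoopA fuel ns i orig =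
      orig ++ (pvSel nums nums.length).drop (pvSel nums i).length := by
  induction fuel generalizing i ns orig with
  | zero =>
    have hi : nums.length ≤ i := by omega
    have hpre := pvSel_prefix nums nums.length i hi
    rw [pvLoopA, List.drop_eq_nil_of_le hpre.length_le, List.append_nil]
  | succ fuel ih =>
    rw [pvLoopA]
    by_cases hlt : i < ns.length
    · rw [if_pos hlt]
      have hiN : i < nums.length := hlen ▸ hlt
      have hcur := hinv i le_rfl hiN
      set c : Int := ((pvSel nums i).countP (fun a => PySem.Int.mod ((i : Int)+1) a == 0) : Int) with hc
      have hcases : (ns.getD i 0 > 0) ↔ (nums.getD i 0 > c) := by rw [hcur]; omega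
      by_cases hcond : nums.getD i 0 > c
      · rw [if_pos (hcases.mpr hcond)]
        have hsel : pvSel nums (i+1) = pvSel nums i ++ [(i : Int)+1] := by
          simp only [pvSel]; rw [if_pos hcond]
        obtain ⟨rest, hrest⟩ := pvSel_prefix nums (i+1) nums.length (by omega)
        have e1 : pvSel nums nums.length = pvSel nums i ++ ([(i : Int)+1] ++ rest) := by
          rw [← hrest, hsel, List.append_assoc]
        have e3 : (pvSel nums nums.length).drop (pvSel nums (i+1)).length = rest := by
          rw [← hrest]; exact List.drop_left
        have hdrop1 : (pvSel nums nums.length).drop (pvSel nums i).length =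
            ((i : Int)+1) :: (pvSel nums nums.length).drop (pvSel nums (i+1)).length := by
          rw [e3, e1, List.drop_left]; rfl
        rw [hdrop1]
        have hinv' : ∀ j, i+1 ≤ j → j < nums.length →
            ((PySem.List.pyRange (i : Int) (ns.length : Int) ((i : Int)+1)).foldl pvDecStep ns).getD j 0 =
              nums.getD j 0 -
                ((pvSel nums (i+1)).countP (fun a => PySem.Int.mod ((j : Int)+1) a == 0) : Int) := by
          intro j hj1 hj2
          have hposL : ∀ x ∈ PySem.List.pyRange (i : Int) (ns.length : Int) ((i : Int)+1), 0 ≤ x := by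
            intro x hx
            have hx' := (PySem.List.mem_pyRange_iff_of_pos (by positivity) x).mp hx
            have hxi : (i : Int) ≤ x := hx'.1
            omega
          rw [pvDecFold_getD _ hposL ns j (by omega), hinv j (by omega) hj2, hlen,
            pvCount_pyRange, hsel, List.countP_append]
          have hdvd_iff : (PySem.Int.mod ((j : Int)+1) ((i : Int)+1) == 0) = true ↔
              ((i : Int)+1) ∣ ((j : Int)+1) := by
            rw [beq_iff_eq, PySem.Int.mod_eq_zero_iff_dvd]
          by_cases hd : ((i : Int)+1) ∣ ((j : Int)+1)
          · rw [if_pos ⟨by omega, hj2, hd⟩]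
            simp only [List.countP_cons, List.countP_nil]
            rw [if_pos (hdvd_iff.mpr hd)]
            push_cast; ring
          · rw [if_neg (by rintro ⟨_, _, hcon⟩; exact hd hcon)]
            simp only [List.countP_cons, List.countP_nil]
            rw [if_neg (fun hcon => hd (hdvd_iff.mp hcon))]
            push_cast; ring
        rw [ih (i+1) _ (orig ++ [(i : Int)+1]) (by rw [pvDecFold_length]; exact hlen)
          (by omega) hinv']
        simp
      · rw [if_neg (by rw [hcases]; omega)]
        have hsel : pvSel nums (i+1) = pvSel nums i := by
          simp only [pvSel]; rw [if_neg (by omega)]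
        rw [ih (i+1) ns orig hlen (by omega)
          (by rw [hsel]; intro j hj1 hj2; exact hinv j (by omega) hj2), hsel]
    · rw [if_neg hlt]
      have hi : nums.length ≤ i := by omega
      have hpre := pvSel_prefix nums nums.length i hi
      rw [List.drop_eq_nil_of_le hpre.length_le, List.append_nil]

-- B's fold over range(1, n+1) computes pvSel
theorem pvAlt_eq (nums : List Int) : get_original_alt nums = pvSel nums nums.length := by
  unfold get_original_alt
  suffices h : ∀ k : Nat, k ≤ nums.length →
      (PySem.List.pyRange 1 ((k : Int) + 1) 1).foldl
        (fun orig b =>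
          let count : Int := (orig.countP (fun a => PySem.Int.mod b a == 0) : Int)
          if nums.getD (b.toNat - 1) 0 > count then orig ++ [b] else orig) [] = pvSel nums k by
    exact h nums.length le_rfl
  intro k hk
  induction k with
  | zero => simp [PySem.List.pyRange_one_eq_nil, pvSel]
  | succ k ih =>
    have hcast : (((k+1 : Nat) : Int) + 1) = ((k : Int) + 1) + 1 := by push_cast; ring
    rw [hcast, PySem.List.pyRange_one_succ_right (by omega), List.foldl_append]
    rw [ih (by omega)]
    simp only [List.foldl_cons, List.foldl_nil, pvSel]
    have hidx : ((k : Int) + 1).toNat - 1 = k := by omega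
    rw [hidx]

-- ===== VERDICT (by name: the statement is the Claim_ definition above) =====
theorem get_original_spec : Claim_equal_get_original := by
  intro nums _
  unfold Spec_get_original
  rw [pvAlt_eq]
  unfold get_original
  rw [pvLoopA_eq nums nums.length 0 nums [] rfl (by omega) (by simp [pvSel])]
  simp [pvSel]
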